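-- pv_equiv track=rewrite | github.com/Devin-Bielejec/bielejec-sheets-be | creatingWorksheets/questions/Algebra/Quadratics/index.py | notDivisibleByPerfectSquareList
-- ===== SOURCE A (Python) =====
-- def notDivisibleByPerfectSquareList(upperRange):
--     squares = [x**2 for x in range(2, upperRange+1)]
--     results = []
--     for item in range(2, upperRange+1):
--       foundSquare = True
--       for square in squares:
--         if item % square == 0:
--           foundSquare = False
--
--       if foundSquare:
--         results.append(item)
--
--     return results
-- ===== SOURCE B (Python) =====
-- def notDivisibleByPerfectSquareList(upperRange):
--     # Sieve: mark every multiple of k*k for k = 2, 3, ... while k*k <= upperRange,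
--     # then collect the unmarked numbers of [2, upperRange].
--     bad = set()
--     k = 2
--     while k * k <= upperRange:
--         bad.update(range(k * k, upperRange + 1, k * k))
--         k += 1
--     return [i for i in range(2, upperRange + 1) if i not in bad]
-- ===== Notes on version B (the rewrite author's own statement) =====
-- stated objective: faster
-- what changed: Replaced the per-item scan over all n-1 squares (quadratic nested loops) by a sieve that marks the multiples of k*k for k*k <= upperRange in a set and then filters the range by set membership.
import Mathlib
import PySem

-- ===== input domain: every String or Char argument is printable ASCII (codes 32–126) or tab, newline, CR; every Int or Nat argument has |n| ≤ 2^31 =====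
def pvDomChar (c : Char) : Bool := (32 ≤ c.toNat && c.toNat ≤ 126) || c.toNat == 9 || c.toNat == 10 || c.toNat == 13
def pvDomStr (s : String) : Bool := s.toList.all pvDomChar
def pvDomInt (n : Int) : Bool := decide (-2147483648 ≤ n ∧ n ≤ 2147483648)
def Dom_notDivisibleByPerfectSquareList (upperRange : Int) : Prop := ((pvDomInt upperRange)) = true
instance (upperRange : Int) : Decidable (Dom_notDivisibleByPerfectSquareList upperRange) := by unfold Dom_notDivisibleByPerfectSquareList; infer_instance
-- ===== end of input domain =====

-- B replaces A's quadratic per-item scan over all squares by a sieve marking multiples of k*k (faster).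


-- ===== PORT A =====
def notDivisibleByPerfectSquareList (upperRange : Int) : List Int :=
  let squares := (PySem.List.pyRange 2 (upperRange + 1) 1).map (fun x => x ^ 2)
  let results : List Int :=
    (PySem.List.pyRange 2 (upperRange + 1) 1).foldl (fun results item =>
      let foundSquare :=
        squares.foldl (fun foundSquare square =>
          if PySem.Int.mod item square == 0 then false else foundSquare) true
      if foundSquare then results ++ [item] else results) []
  results

-- ===== PORT B =====
-- the while loop 'while k*k <= upperRange: bad.update(range(k*k, upperRange+1, k*k)); k += 1'
def sieveLoop (upperRange : Int) (k : Int) (bad : PySem.Set Int) : PySem.Set Int :=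
  if _h : k * k ≤ upperRange then
    sieveLoop upperRange (k + 1) (PySem.Set.update bad (PySem.List.pyRange (k * k) (upperRange + 1) (k * k)))
  else bad
  termination_by (upperRange + 1 - k).toNat
  decreasing_by
    have hk : k ≤ k * k := by nlinarith [sq_nonneg k, sq_nonneg (k - 1)]
    omega

def notDivisibleByPerfectSquareList_alt (upperRange : Int) : List Int :=
  let bad := sieveLoop upperRange 2 PySem.Set.empty
  (PySem.List.pyRange 2 (upperRange + 1) 1).filter (fun i => !(PySem.Set.contains bad i))

-- ===== PRECONDITION & SPEC =====
def Spec_notDivisibleByPerfectSquareList (upperRange : Int) (out : List Int) : Prop := out = notDivisibleByPerfectSquareList_alt upperRange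
instance (upperRange : Int) (out : List Int) : Decidable (Spec_notDivisibleByPerfectSquareList upperRange out) := by unfold Spec_notDivisibleByPerfectSquareList; infer_instance

-- ===== CLAIM (what is proved, stated in full; the proofs are below) =====
def Claim_equal_notDivisibleByPerfectSquareList : Prop := ∀ (upperRange : Int), Dom_notDivisibleByPerfectSquareList upperRange → Spec_notDivisibleByPerfectSquareList upperRange (notDivisibleByPerfectSquareList upperRange)

-- ===== LEMMAS AND PROOFS =====

-- membership in the sieve's set: exactly the multiples of some j*j (j ≥ k, j*j ≤ n) lying in [j*j, n]
theorem mem_sieveLoop (n k : Int) (bad : PySem.Set Int) (i : Int) :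
    2 ≤ k → (i ∈ sieveLoop n k bad ↔
      i ∈ bad ∨ ∃ j : Int, k ≤ j ∧ j * j ≤ n ∧ j * j ≤ i ∧ i < n + 1 ∧ j * j ∣ i) := by
  induction k, bad using sieveLoop.induct n with
  | case1 k bad h ih =>
    intro hk2
    have hkpos : (0:Int) < k * k := by positivity
    rw [sieveLoop, dif_pos h, ih (by omega), PySem.Set.mem_update]
    constructor
    · rintro ((hb | hr) | ⟨j, hj1, hj2, hj3, hj4, hj5⟩)
      · exact Or.inl hb
      · rw [PySem.List.mem_pyRange_iff_of_pos hkpos] at hr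
        have hdvd : k * k ∣ i := by
          have := dvd_add hr.2.2 (dvd_refl (k * k)); simpa using this
        exact Or.inr ⟨k, le_refl k, h, hr.1, hr.2.1, hdvd⟩
      · exact Or.inr ⟨j, by omega, hj2, hj3, hj4, hj5⟩
    · rintro (hb | ⟨j, hj1, hj2, hj3, hj4, hj5⟩)
      · exact Or.inl (Or.inl hb)
      · by_cases hjk : j = k
        · subst hjk
          refine Or.inl (Or.inr ?_)
          rw [PySem.List.mem_pyRange_iff_of_pos hkpos]
          exact ⟨hj3, hj4, dvd_sub hj5 (dvd_refl _)⟩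
        · exact Or.inr ⟨j, by omega, hj2, hj3, hj4, hj5⟩
  | case2 k bad h =>
    intro hk2
    rw [sieveLoop, dif_neg h]
    constructor
    · exact Or.inl
    · rintro (hb | ⟨j, hj1, hj2, hj3, hj4, hj5⟩)
      · exact hb
      · exfalso
        have : k * k ≤ j * j := by nlinarith
        omega

-- for 2 ≤ i ≤ n: A's test "some square x^2 (2 ≤ x ≤ n) divides i" agrees with sieve membership
theorem test_agree (n i : Int) (hi : 2 ≤ i ∧ i < n + 1) :
    (((PySem.List.pyRange 2 (n + 1) 1).map (fun x => x ^ 2)).any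
        (fun s => PySem.Int.mod i s == 0))
      = PySem.Set.contains (sieveLoop n 2 PySem.Set.empty) i := by
  have hmem : i ∈ sieveLoop n 2 PySem.Set.empty ↔
      ∃ j : Int, 2 ≤ j ∧ j * j ≤ n ∧ j * j ≤ i ∧ i < n + 1 ∧ j * j ∣ i := by
    rw [mem_sieveLoop n 2 PySem.Set.empty i (le_refl 2)]
    simp [PySem.Set.empty]
  by_cases hin : i ∈ sieveLoop n 2 PySem.Set.empty
  · rw [(PySem.Set.contains_iff _ _).mpr hin]
    rcases hmem.mp hin with ⟨j, hj1, hj2, hj3, hj4, hj5⟩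
    simp only [List.any_map, List.any_eq_true, Function.comp]
    refine ⟨j, ?_, ?_⟩
    · rw [PySem.List.mem_pyRange_one]
      exact ⟨hj1, by nlinarith⟩
    · simp only [beq_iff_eq, PySem.Int.mod_eq_zero_iff_dvd]
      calc j ^ 2 = j * j := sq j
        _ ∣ i := hj5
  · have hfalse : PySem.Set.contains (sieveLoop n 2 PySem.Set.empty) i = false := by
      rcases Bool.eq_false_or_eq_true (PySem.Set.contains (sieveLoop n 2 PySem.Set.empty) i) with hf | ht
      · exact absurd ((PySem.Set.contains_iff _ _).mp hf) hin
      · exact ht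
    rw [hfalse]
    rw [List.any_map]
    simp only [List.any_eq_false, Function.comp_apply]
    intro x hx
    rw [PySem.List.mem_pyRange_one] at hx
    simp only [beq_iff_eq, PySem.Int.mod_eq_zero_iff_dvd]
    intro hdvd
    rw [sq] at hdvd
    apply hin
    apply hmem.mpr
    have hle : x * x ≤ i := Int.le_of_dvd (by omega) hdvd
    exact ⟨x, hx.1, by omega, hle, hi.2, hdvd⟩

-- ===== VERDICT (by name: the statement is the Claim_ definition above) =====
theorem notDivisibleByPerfectSquareList_spec : Claim_equal_notDivisibleByPerfectSquareList := by
  intro n _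
  unfold Spec_notDivisibleByPerfectSquareList
  unfold notDivisibleByPerfectSquareList notDivisibleByPerfectSquareList_alt
  simp only []
  rw [PySem.List.foldl_congr_mem _ _
      (fun (acc : List Int) (item : Int) =>
        if (!(PySem.Set.contains (sieveLoop n 2 PySem.Set.empty) item)) = true
        then acc ++ [item] else acc) []
      (by
        intro acc item hmem
        rw [PySem.List.mem_pyRange_one] at hmem
        rw [PySem.List.foldl_if_false_eq
            (fun square => PySem.Int.mod item square == 0)]
        rw [Bool.true_and, test_agree n item ⟨hmem.1, hmem.2⟩])]
  rw [PySem.List.foldl_append_if_eq_filter]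
  simp
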